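-- pv_equiv track=rewrite | github.com/gynamics/pynyac | pynyac.py | nyasbox
-- ===== SOURCE A (Python) =====
-- import math
--
-- def nyasbox(nyaclist, salt=1145141919810):
--     "Generate an sbox, you can customize it as you will"
--     sz = len(nyaclist)
--     sbox = list(range(0, sz))
--     for i in range(1, math.ceil(math.sqrt(sz))):
--         for j in range(i, sz, i):
--             sbox[j-i], sbox[j] = sbox[j], sbox[j-i]
--     # salting
--     k = 0
--     for i in range(1, sz):
--         n = ord(nyaclist[i])
--         j = (i * ((salt // i) - n) // salt) % sz  # what the fuck?
--         k = (k + (salt // i) - (n // salt)) % sz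
--         sbox[j], sbox[k] = sbox[k], sbox[j]
--     return sbox
-- ===== SOURCE B (Python) =====
-- import math
--
-- def nyasbox(nyaclist, salt=1145141919810):
--     "Generate an sbox, you can customize it as you will"
--     sz = len(nyaclist)
--     sbox = list(range(0, sz))
--     # phase 1: each stride chain 0, i, 2i, ... is rotated left by one
--     # (gather the chain, rotate it, scatter it back) instead of the
--     # original chain of adjacent swaps
--     for i in range(1, math.ceil(math.sqrt(sz))):
--         idx = list(range(0, sz, i))
--         vals = [sbox[p] for p in idx]
--         rot = vals[1:] + vals[:1]
--         for t in range(len(idx)):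
--             sbox[idx[t]] = rot[t]
--     # salting (identical to the original)
--     k = 0
--     for i in range(1, sz):
--         n = ord(nyaclist[i])
--         j = (i * ((salt // i) - n) // salt) % sz
--         k = (k + (salt // i) - (n // salt)) % sz
--         sbox[j], sbox[k] = sbox[k], sbox[j]
--     return sbox
-- ===== Notes on version B (the rewrite author's own statement) =====
-- stated objective: alternative
-- what changed: Phase 1's chain of adjacent pairwise swaps along each stride-i index chain is replaced by gather-rotate-scatter: the chain's values are read once, rotated left by one, and written back; the salting loop is unchanged.
import Mathlib
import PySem

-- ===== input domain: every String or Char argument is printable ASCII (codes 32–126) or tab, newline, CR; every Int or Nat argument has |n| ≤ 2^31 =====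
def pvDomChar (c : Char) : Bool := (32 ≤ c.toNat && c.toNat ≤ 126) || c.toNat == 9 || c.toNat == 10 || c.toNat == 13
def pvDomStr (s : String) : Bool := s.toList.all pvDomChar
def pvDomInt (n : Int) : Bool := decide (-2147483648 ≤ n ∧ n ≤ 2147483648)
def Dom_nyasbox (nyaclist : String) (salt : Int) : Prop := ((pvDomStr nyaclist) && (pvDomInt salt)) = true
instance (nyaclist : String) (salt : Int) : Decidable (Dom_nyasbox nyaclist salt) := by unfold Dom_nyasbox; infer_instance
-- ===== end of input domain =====

-- B rewrites phase 1: each stride chain is gathered, rotated left by one, and scattered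
-- back, instead of the original chain of adjacent swaps (objective: alternative).

-- `math.ceil(math.sqrt(n))` for a Nat n; exact (the double sqrt of an int ≤ 2^52 is
-- correctly rounded, so its ceiling is the least m with n ≤ m^2, which this computes).
def ceilSqrt (n : Nat) : Nat := if n = 0 then 0 else Nat.sqrt (n - 1) + 1

-- Python tuple swap `l[a], l[b] = l[b], l[a]` (a, b in range here; exact then).
def swapIdx (l : List Int) (a b : Nat) : List Int :=
  ((l.set a (l.getD b 0)).set b (l.getD a 0))

-- salting loop, identical character for character in A and in B, hence one shared helper.
-- `nyaclist[i]` / `ord` ported as toList.getD + Char.toNat (exact: 1 ≤ i < len);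
-- j, k are results of `% sz` with sz > 0, hence nonnegative, so `.toNat` is exact.
def saltMix (nyaclist : String) (salt : Int) (sbox0 : List Int) : List Int :=
  let cs := nyaclist.toList
  let sz := cs.length
  ((List.range' 1 (sz - 1)).foldl (fun (st : List Int × Int) i =>
      let n : Int := (cs.getD i ' ').toNat
      let j := PySem.Int.mod (PySem.Int.floordiv ((i : Int) * (PySem.Int.floordiv salt (i : Int) - n)) salt) (sz : Int)
      let k := PySem.Int.mod (st.2 + PySem.Int.floordiv salt (i : Int) - PySem.Int.floordiv n salt) (sz : Int)
      (swapIdx st.1 j.toNat k.toNat, k)) (sbox0, (0 : Int))).1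

-- ===== PORT A =====
-- inner loop `for j in range(i, sz, i): sbox[j-i], sbox[j] = sbox[j], sbox[j-i]`;
-- m is the number of iterations, the (t+1)-st iteration has j = (t+1)*i.
def innerA (i : Nat) : Nat → List Int → List Int
  | 0, l => l
  | t + 1, l => swapIdx (innerA i t l) (t * i) ((t + 1) * i)

def nyasbox (nyaclist : String) (salt : Int) : List Int :=
  let sz := nyaclist.toList.length
  let sbox := (List.range sz).map Int.ofNat    -- list(range(0, sz))
  -- range(i, sz, i) has (sz-1)/i elements (Nat division; 0 when sz = 0)
  saltMix nyaclist salt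
    ((List.range' 1 (ceilSqrt sz - 1)).foldl (fun l i => innerA i ((sz - 1) / i) l) sbox)

-- ===== PORT B =====
-- one pass of B's phase 1: gather the stride chain, rotate left by one, scatter back.
def rotChain (i sz : Nat) (l : List Int) : List Int :=
  let idx := (List.range ((sz + i - 1) / i)).map (fun t => t * i)  -- list(range(0, sz, i)), i ≥ 1
  let vals := idx.map (fun p => l.getD p 0)
  let rot := vals.drop 1 ++ vals.take 1                            -- vals[1:] + vals[:1]
  (List.range idx.length).foldl (fun s t => s.set (idx.getD t 0) (rot.getD t 0)) l

def nyasbox_alt (nyaclist : String) (salt : Int) : List Int :=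
  let sz := nyaclist.toList.length
  let sbox := (List.range sz).map Int.ofNat    -- list(range(0, sz))
  saltMix nyaclist salt
    ((List.range' 1 (ceilSqrt sz - 1)).foldl (fun l i => rotChain i sz l) sbox)

-- ===== PRECONDITION & SPEC =====
-- Pre_ excludes exactly the inputs where Python A raises ZeroDivisionError:
-- salt = 0 while the salting loop runs (len ≥ 2) divides by salt.
def Pre_nyasbox (nyaclist : String) (salt : Int) : Prop :=
  salt ≠ 0 ∨ nyaclist.toList.length ≤ 1

instance (nyaclist : String) (salt : Int) : Decidable (Pre_nyasbox nyaclist salt) := by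
  unfold Pre_nyasbox; infer_instance

def pvWitness_nyasbox : String × Int := ("nya!", 7)

def Spec_nyasbox (nyaclist : String) (salt : Int) (out : List Int) : Prop := out = nyasbox_alt nyaclist salt
instance (nyaclist : String) (salt : Int) (out : List Int) : Decidable (Spec_nyasbox nyaclist salt out) := by unfold Spec_nyasbox; infer_instance

-- ===== CLAIM (what is proved, stated in full; the proofs are below) =====
def Claim_equal_nyasbox : Prop := ∀ (nyaclist : String) (salt : Int), Dom_nyasbox nyaclist salt → Pre_nyasbox nyaclist salt → Spec_nyasbox nyaclist salt (nyasbox nyaclist salt)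

-- ===== LEMMAS AND PROOFS =====

theorem length_swapIdx (l : List Int) (a b : Nat) : (swapIdx l a b).length = l.length := by
  simp [swapIdx]

theorem getD_set_self (l : List Int) (p : Nat) (v : Int) (h : p < l.length) :
    (l.set p v).getD p 0 = v := by
  simp [List.getD_eq_getElem?_getD, h]

theorem getD_set_ne (l : List Int) (p x : Nat) (v : Int) (h : x ≠ p) :
    (l.set p v).getD x 0 = l.getD x 0 := by
  simp [List.getD_eq_getElem?_getD, (Ne.symm h)]

theorem getD_swapIdx (l : List Int) (a b x : Nat) (ha : a < l.length) (hb : b < l.length) :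
    (swapIdx l a b).getD x 0 =
      if x = b then l.getD a 0 else if x = a then l.getD b 0 else l.getD x 0 := by
  unfold swapIdx
  by_cases hxb : x = b
  · subst hxb
    rw [getD_set_self _ _ _ (by simpa using hb), if_pos rfl]
  · rw [getD_set_ne _ _ _ _ hxb, if_neg hxb]
    by_cases hxa : x = a
    · subst hxa
      rw [getD_set_self _ _ _ ha, if_pos rfl]
    · rw [getD_set_ne _ _ _ _ hxa, if_neg hxa]

-- the value the rotated chain leaves at position x (the shared characterization)
def rotSpec (l : List Int) (i m x : Nat) : Int :=
  if i ∣ x ∧ x < m * i then l.getD (x + i) 0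
  else if x = m * i then l.getD 0 0
  else l.getD x 0

theorem length_innerA (i m : Nat) (l : List Int) : (innerA i m l).length = l.length := by
  induction m with
  | zero => rfl
  | succ t ih => simp [innerA, length_swapIdx, ih]

theorem getD_innerA (i : Nat) (hi : 1 ≤ i) (l : List Int) :
    ∀ m, m * i < l.length → ∀ x, (innerA i m l).getD x 0 = rotSpec l i m x := by
  intro m
  induction m with
  | zero =>
    intro _ x
    simp only [innerA, rotSpec, Nat.zero_mul]
    rw [if_neg (by rintro ⟨_, h⟩; omega)]
    split
    · rename_i h; subst h; rfl
    · rfl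
  | succ t ih =>
    intro hm x
    have htl : t * i < l.length := by nlinarith
    have hne : (t + 1) * i ≠ t * i := by nlinarith
    simp only [innerA]
    rw [getD_swapIdx _ _ _ _ (by rw [length_innerA]; exact htl) (by rw [length_innerA]; exact hm)]
    by_cases hxb : x = (t + 1) * i
    · -- the last chain position receives the first chain value
      subst hxb
      rw [if_pos rfl, ih htl _]
      simp only [rotSpec]
      rw [if_neg (by rintro ⟨_, h⟩; omega), if_pos trivial,
          if_neg (by rintro ⟨_, h⟩; omega), if_pos trivial]
    · rw [if_neg hxb]
      by_cases hxa : x = t * i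
      · -- each interior chain position receives its successor's value
        subst hxa
        rw [if_pos rfl, ih htl _]
        simp only [rotSpec]
        rw [if_neg (by rintro ⟨_, h⟩; nlinarith), if_neg hne,
            if_pos ⟨⟨t, Nat.mul_comm t i⟩, by nlinarith⟩]
        congr 1; ring
      · rw [if_neg hxa, ih htl _]
        simp only [rotSpec]
        by_cases h1 : i ∣ x ∧ x < t * i
        · rw [if_pos h1, if_pos ⟨h1.1, by nlinarith⟩]
        · rw [if_neg h1]
          have h2 : ¬ (i ∣ x ∧ x < (t + 1) * i) := by
            rintro ⟨⟨c, rfl⟩, hlt⟩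
            have hct : c < t + 1 := by
              by_contra hc; push Not at hc; nlinarith
            have hct' : c ≠ t := by rintro rfl; exact hxa (Nat.mul_comm i c)
            exact h1 ⟨⟨c, rfl⟩, by
              rw [Nat.mul_comm]; exact (Nat.mul_lt_mul_right hi).mpr (by omega)⟩
          rw [if_neg h2, if_neg hxa, if_neg hxb]

-- generic scatter: fold of distinct in-range writes set (f t) (g t), t = 0 .. n-1
theorem length_scatter (f : Nat → Nat) (g : Nat → Int) (n : Nat) (l : List Int) :
    ((List.range n).foldl (fun s t => s.set (f t) (g t)) l).length = l.length := by
  induction n generalizing l with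
  | zero => rfl
  | succ k ih => rw [List.range_succ, List.foldl_append]; simp [ih]

theorem getD_scatter_miss (f : Nat → Nat) (g : Nat → Int) (n : Nat) (l : List Int) (x : Nat)
    (h : ∀ t < n, f t ≠ x) :
    ((List.range n).foldl (fun s t => s.set (f t) (g t)) l).getD x 0 = l.getD x 0 := by
  induction n with
  | zero => rfl
  | succ k ih =>
    rw [List.range_succ, List.foldl_append]
    simp only [List.foldl_cons, List.foldl_nil]
    rw [getD_set_ne _ _ _ _ (Ne.symm (h k (by omega))), ih (fun t ht => h t (by omega))]

theorem getD_scatter_hit (f : Nat → Nat) (g : Nat → Int) (n : Nat) (l : List Int)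
    (hinj : ∀ s t, s < n → t < n → f s = f t → s = t)
    (hb : ∀ t, t < n → f t < l.length) (t : Nat) (ht : t < n) :
    ((List.range n).foldl (fun s t => s.set (f t) (g t)) l).getD (f t) 0 = g t := by
  induction n with
  | zero => omega
  | succ k ih =>
    rw [List.range_succ, List.foldl_append]
    simp only [List.foldl_cons, List.foldl_nil]
    by_cases htk : t = k
    · subst htk
      exact getD_set_self _ _ _ (by rw [length_scatter]; exact hb t ht)
    · have htk' : t < k := by omega
      rw [getD_set_ne _ _ _ _ (fun h => htk (hinj t k (by omega) (by omega) h)),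
          ih (fun s t hs ht h => hinj s t (by omega) (by omega) h)
             (fun s hs => hb s (by omega)) htk']

theorem length_rotChain (i sz : Nat) (l : List Int) : (rotChain i sz l).length = l.length := by
  unfold rotChain; exact length_scatter _ _ _ _

theorem getD_map_range_mul (i n t : Nat) (ht : t < n) :
    ((List.range n).map (fun t => t * i)).getD t 0 = t * i := by
  rw [List.getD_eq_getElem _ _ (by simpa using ht)]
  simp

theorem getD_rotChain (i sz : Nat) (l : List Int) (hi : 1 ≤ i) (hsz : 1 ≤ sz)
    (hl : l.length = sz) (x : Nat) :
    (rotChain i sz l).getD x 0 = rotSpec l i ((sz - 1) / i) x := by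
  set m := (sz - 1) / i with hm
  have hmi : m * i ≤ sz - 1 := Nat.div_mul_le_self (sz - 1) i
  have hcnt : (sz + i - 1) / i = m + 1 := by
    have : sz + i - 1 = (sz - 1) + i := by omega
    rw [this, Nat.add_div_right _ (by omega)]
  unfold rotChain
  simp only [hcnt]
  set vals := (((List.range (m + 1)).map (fun t => t * i)).map (fun p => l.getD p 0)) with hvals
  have hvals' : vals = (List.range (m + 1)).map (fun t => l.getD (t * i) 0) := by
    rw [hvals, List.map_map]; rfl
  set rot := vals.drop 1 ++ vals.take 1 with hrot
  have hvlen : vals.length = m + 1 := by rw [hvals']; simp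
  have hrotlen : rot.length = m + 1 := by rw [hrot]; simp [hvlen]
  have hrotget : ∀ t, t < m + 1 → rot.getD t 0 =
      (if t = m then l.getD 0 0 else l.getD ((t + 1) * i) 0) := by
    intro t htm
    rw [hrot, List.getD_eq_getElem?_getD, List.getElem?_append]
    have h0 : vals.take 1 = [l.getD 0 0] := by
      rw [hvals']; rcases m with _ | m' <;> simp [List.range_succ_eq_map]
    by_cases htm' : t = m
    · subst htm'
      rw [if_neg (by simp [hvlen]), if_pos rfl]
      have hsub : m - (vals.drop 1).length = 0 := by simp [hvlen]
      rw [hsub, h0]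
      rfl
    · rw [if_pos (by simp [hvlen]; omega)]
      rw [List.getElem?_drop, hvals', List.getElem?_map, List.getElem?_range (by omega)]
      simp [if_neg htm', Nat.add_comm 1 t]
  have hlen : ((List.range (m + 1)).map (fun t => t * i)).length = m + 1 := by simp
  rw [hlen]
  -- rewrite the loop body: for t < m+1, idx.getD t 0 = t * i
  rw [PySem.List.foldl_congr_mem (List.range (m + 1))
    (fun s t => s.set (((List.range (m + 1)).map (fun t => t * i)).getD t 0) (rot.getD t 0))
    (fun s t => s.set (t * i) (rot.getD t 0)) l
    (by intro s t htm; simp only [getD_map_range_mul i (m + 1) t (by simpa using htm)])]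
  have hinj : ∀ s t, s < m + 1 → t < m + 1 → s * i = t * i → s = t := by
    intro s t _ _ h; exact Nat.eq_of_mul_eq_mul_right (by omega) h
  have hb : ∀ t, t < m + 1 → t * i < l.length := by
    intro t ht; have : t * i ≤ m * i := Nat.mul_le_mul_right i (by omega); omega
  unfold rotSpec
  by_cases h1 : i ∣ x ∧ x < m * i
  · obtain ⟨⟨c, rfl⟩, hlt⟩ := h1
    have hcm : c < m := by
      by_contra hc; push Not at hc; nlinarith
    rw [if_pos ⟨⟨c, rfl⟩, hlt⟩, Nat.mul_comm i c]
    rw [getD_scatter_hit _ _ _ _ hinj hb c (by omega), hrotget c (by omega),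
        if_neg (by omega)]
    congr 1; ring
  · rw [if_neg h1]
    by_cases h2 : x = m * i
    · subst h2
      rw [if_pos rfl, getD_scatter_hit _ _ _ _ hinj hb m (by omega), hrotget m (by omega),
          if_pos rfl]
    · rw [if_neg h2]
      rw [getD_scatter_miss]
      intro t ht hcon
      by_cases htm : t = m
      · exact h2 (by rw [← hcon, htm])
      · exact h1 ⟨⟨t, by rw [← hcon]; ring⟩, by
          rw [← hcon]; exact (Nat.mul_lt_mul_right (by omega : 0 < i)).mpr (by omega)⟩

theorem chain_eq (i sz : Nat) (l : List Int) (hi : 1 ≤ i) (hsz : 1 ≤ sz) (hl : l.length = sz) :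
    innerA i ((sz - 1) / i) l = rotChain i sz l := by
  have hmi : (sz - 1) / i * i ≤ sz - 1 := Nat.div_mul_le_self (sz - 1) i
  have hbound : (sz - 1) / i * i < l.length := by omega
  apply List.ext_getElem
  · rw [length_innerA, length_rotChain]
  · intro n h1 h2
    have e1 := getD_innerA i hi l ((sz - 1) / i) hbound n
    have e2 := getD_rotChain i sz l hi hsz hl n
    rw [List.getD_eq_getElem _ _ h1] at e1
    rw [List.getD_eq_getElem _ _ h2] at e2
    rw [e1, e2]

theorem fold_phase (sz : Nat) (hsz : 1 ≤ sz) (is : List Nat) (hmem : ∀ i ∈ is, 1 ≤ i)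
    (l : List Int) (hl : l.length = sz) :
    is.foldl (fun l i => innerA i ((sz - 1) / i) l) l =
    is.foldl (fun l i => rotChain i sz l) l := by
  induction is generalizing l with
  | nil => rfl
  | cons i is ih =>
    simp only [List.foldl_cons]
    rw [chain_eq i sz l (hmem i (by simp)) hsz hl]
    exact ih (fun j hj => hmem j (by simp [hj])) _ (by rw [length_rotChain, hl])

theorem nyasbox_eq_alt (nyaclist : String) (salt : Int) :
    nyasbox nyaclist salt = nyasbox_alt nyaclist salt := by
  simp only [nyasbox, nyasbox_alt]
  by_cases hsz : nyaclist.toList.length = 0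
  · simp [hsz, ceilSqrt]
  · congr 1
    exact fold_phase nyaclist.toList.length (by omega)
      (List.range' 1 (ceilSqrt nyaclist.toList.length - 1))
      (fun i hi => (List.mem_range'_1.mp hi).1) _ (by simp)

-- ===== VERDICT (by name: the statement is the Claim_ definition above) =====
theorem nyasbox_spec : Claim_equal_nyasbox := by
  intro nyaclist salt _ _
  exact nyasbox_eq_alt nyaclist salt
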